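-- pv_equiv track=rewrite | github.com/abelponce03/Problemas-Evaluativos-AC-2024 | Tarea Evaluativa/Problemas/Ejercicio 67/Seudocodigo.py | Ordenacion
-- ===== SOURCE A (Python) =====
-- def Ordenacion (size, lista):
--
--     C = False
--     D = False
--
--     for i in range(1, size):
--
--         if lista[i] > lista[i - 1]:  C = True
--
--         elif lista[i] < lista[i - 1]:  D = True
--
--         if D & C : break
--
--     if D & C : return "NO ESTA ORDENADA"
--     elif D : return "D"
--     else : return "C"
-- ===== SOURCE B (Python) =====
-- def Ordenacion(size, lista):
--     has_asc = any(lista[i] > lista[i - 1] for i in range(1, size))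
--     has_desc = any(lista[i] < lista[i - 1] for i in range(1, size))
--     if has_asc and has_desc:
--         return "NO ESTA ORDENADA"
--     if has_desc:
--         return "D"
--     return "C"
-- ===== Notes on version B (the rewrite author's own statement) =====
-- stated objective: simpler
-- what changed: Replaces the interleaved flag-setting loop with break by two independent short-circuiting any() scans for an ascent and a descent, then a three-way classification.
import Mathlib
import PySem

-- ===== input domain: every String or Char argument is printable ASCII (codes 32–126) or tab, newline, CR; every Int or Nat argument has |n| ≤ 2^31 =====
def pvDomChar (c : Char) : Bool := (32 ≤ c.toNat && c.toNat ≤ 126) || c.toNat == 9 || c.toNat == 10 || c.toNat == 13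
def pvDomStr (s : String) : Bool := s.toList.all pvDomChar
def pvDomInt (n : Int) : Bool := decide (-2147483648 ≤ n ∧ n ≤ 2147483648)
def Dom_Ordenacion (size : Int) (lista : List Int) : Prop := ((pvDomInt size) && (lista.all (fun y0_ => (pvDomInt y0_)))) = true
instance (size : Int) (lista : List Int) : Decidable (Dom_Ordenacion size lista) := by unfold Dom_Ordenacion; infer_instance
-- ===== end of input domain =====

-- B replaces A's single interleaved flag-setting loop (with break) by two independent
-- short-circuiting scans for an ascent and a descent; objective: simpler.

-- ===== PORT A =====
-- the for-loop over range(1, size): index i plus the remaining iteration count as Nat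
-- fuel (= len(range(i, size)), so the loop is exactly range(1, size)); state (C, D);
-- break when both flags are set; pyGet? none = IndexError (excluded by Pre_)
def ordLoopA (lista : List Int) : Nat → Int → Bool → Bool → Bool × Bool
  | 0, _, C, D => (C, D)
  | fuel + 1, i, C, D =>
    match PySem.List.pyGet? lista i, PySem.List.pyGet? lista (i - 1) with
    | some a, some b =>
      let C' := if a > b then true else C
      let D' := if a > b then D else if a < b then true else D
      if D' && C' then (C', D') else ordLoopA lista fuel (i + 1) C' D'
    | _, _ => (C, D)

def Ordenacion (size : Int) (lista : List Int) : String :=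
  let p := ordLoopA lista (size - 1).toNat 1 false false
  if p.2 && p.1 then "NO ESTA ORDENADA"
  else if p.2 then "D"
  else "C"

-- ===== PORT B =====
-- any(lista[i] > lista[i-1] for i in range(1, size)) — short-circuiting scan
def anyAscI (lista : List Int) : Nat → Int → Bool
  | 0, _ => false
  | fuel + 1, i =>
    match PySem.List.pyGet? lista i, PySem.List.pyGet? lista (i - 1) with
    | some a, some b => if a > b then true else anyAscI lista fuel (i + 1)
    | _, _ => false

-- any(lista[i] < lista[i-1] for i in range(1, size))
def anyDescI (lista : List Int) : Nat → Int → Bool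
  | 0, _ => false
  | fuel + 1, i =>
    match PySem.List.pyGet? lista i, PySem.List.pyGet? lista (i - 1) with
    | some a, some b => if a < b then true else anyDescI lista fuel (i + 1)
    | _, _ => false

def Ordenacion_alt (size : Int) (lista : List Int) : String :=
  let hasAsc := anyAscI lista (size - 1).toNat 1
  let hasDesc := anyDescI lista (size - 1).toNat 1
  if hasAsc && hasDesc then "NO ESTA ORDENADA"
  else if hasDesc then "D"
  else "C"

-- ===== PRECONDITION & SPEC =====
-- Pre_ excludes exactly the inputs on which A raises IndexError: size > len(lista) and the
-- list's adjacent pairs do not contain both a strict ascent and a strict descent (the early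
-- break would otherwise return before the out-of-range access).
def Pre_Ordenacion (size : Int) (lista : List Int) : Prop :=
  size ≤ lista.length ∨
    ((∃ j, j < lista.length ∧ 0 < j ∧ lista.getD j 0 > lista.getD (j - 1) 0) ∧
     (∃ j, j < lista.length ∧ 0 < j ∧ lista.getD j 0 < lista.getD (j - 1) 0))
instance (size : Int) (lista : List Int) : Decidable (Pre_Ordenacion size lista) := by
  unfold Pre_Ordenacion; infer_instance

def pvWitness_Ordenacion : Int × List Int := (4, [1, 3, 2, 2])

def Spec_Ordenacion (size : Int) (lista : List Int) (out : String) : Prop := out = Ordenacion_alt size lista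
instance (size : Int) (lista : List Int) (out : String) : Decidable (Spec_Ordenacion size lista out) := by unfold Spec_Ordenacion; infer_instance

-- ===== CLAIM (what is proved, stated in full; the proofs are below) =====
def Claim_equal_Ordenacion : Prop := ∀ (size : Int) (lista : List Int), Dom_Ordenacion size lista → Pre_Ordenacion size lista → Spec_Ordenacion size lista (Ordenacion size lista)

-- ===== LEMMAS AND PROOFS =====

-- list-index versions of the three loops (proof helpers only)
def ordLoopAL (lista : List Int) : List Int → Bool → Bool → Bool × Bool
  | [], C, D => (C, D)
  | i :: rest, C, D =>
    match PySem.List.pyGet? lista i, PySem.List.pyGet? lista (i - 1) with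
    | some a, some b =>
      let C' := if a > b then true else C
      let D' := if a > b then D else if a < b then true else D
      if D' && C' then (C', D') else ordLoopAL lista rest C' D'
    | _, _ => (C, D)

def anyAscL (lista : List Int) : List Int → Bool
  | [] => false
  | i :: rest =>
    match PySem.List.pyGet? lista i, PySem.List.pyGet? lista (i - 1) with
    | some a, some b => if a > b then true else anyAscL lista rest
    | _, _ => false

def anyDescL (lista : List Int) : List Int → Bool
  | [] => false
  | i :: rest =>
    match PySem.List.pyGet? lista i, PySem.List.pyGet? lista (i - 1) with
    | some a, some b => if a < b then true else anyDescL lista rest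
    | _, _ => false

-- the fuel loops compute the list loops over pyRange i (i+n) 1
theorem ordLoopA_eq_list (lista : List Int) :
    ∀ (n : Nat) (i : Int) (C D : Bool),
      ordLoopA lista n i C D = ordLoopAL lista (PySem.List.pyRange i (i + n) 1) C D := by
  intro n
  induction n with
  | zero =>
    intro i C D
    rw [ordLoopA, PySem.List.pyRange_one_eq_nil (by omega), ordLoopAL]
  | succ m ih =>
    intro i C D
    rw [ordLoopA]
    push_cast
    rw [PySem.List.pyRange_one_cons (by omega : i < i + ((m : Int) + 1)), ordLoopAL]
    cases hx : PySem.List.pyGet? lista i with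
    | none => rfl
    | some a =>
      cases hy : PySem.List.pyGet? lista (i - 1) with
      | none => rfl
      | some b =>
        simp only
        split_ifs <;>
          first
          | rfl
          | rw [ih (i + 1), show i + 1 + (m : Int) = i + ((m : Int) + 1) by omega]

theorem anyAscI_eq_list (lista : List Int) :
    ∀ (n : Nat) (i : Int),
      anyAscI lista n i = anyAscL lista (PySem.List.pyRange i (i + n) 1) := by
  intro n
  induction n with
  | zero =>
    intro i
    rw [anyAscI, PySem.List.pyRange_one_eq_nil (by omega), anyAscL]
  | succ m ih =>
    intro i
    rw [anyAscI]
    push_cast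
    rw [PySem.List.pyRange_one_cons (by omega : i < i + ((m : Int) + 1)), anyAscL]
    cases hx : PySem.List.pyGet? lista i with
    | none => rfl
    | some a =>
      cases hy : PySem.List.pyGet? lista (i - 1) with
      | none => rfl
      | some b =>
        simp only
        split_ifs <;>
          first
          | rfl
          | rw [ih (i + 1), show i + 1 + (m : Int) = i + ((m : Int) + 1) by omega]

theorem anyDescI_eq_list (lista : List Int) :
    ∀ (n : Nat) (i : Int),
      anyDescI lista n i = anyDescL lista (PySem.List.pyRange i (i + n) 1) := by
  intro n
  induction n with
  | zero =>
    intro i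
    rw [anyDescI, PySem.List.pyRange_one_eq_nil (by omega), anyDescL]
  | succ m ih =>
    intro i
    rw [anyDescI]
    push_cast
    rw [PySem.List.pyRange_one_cons (by omega : i < i + ((m : Int) + 1)), anyDescL]
    cases hx : PySem.List.pyGet? lista i with
    | none => rfl
    | some a =>
      cases hy : PySem.List.pyGet? lista (i - 1) with
      | none => rfl
      | some b =>
        simp only
        split_ifs <;>
          first
          | rfl
          | rw [ih (i + 1), show i + 1 + (m : Int) = i + ((m : Int) + 1) by omega]


-- Bool tests for an ascent / descent at Nat position j (second element of the pair)
def ascB (lista : List Int) (j : Nat) : Bool := decide (lista.getD j 0 > lista.getD (j - 1) 0)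
def descB (lista : List Int) (j : Nat) : Bool := decide (lista.getD j 0 < lista.getD (j - 1) 0)

theorem pyGet?_valid (lista : List Int) (i : Int) (h1 : 1 ≤ i) (h2 : i < lista.length) :
    PySem.List.pyGet? lista i = some (lista.getD i.toNat 0) ∧
      PySem.List.pyGet? lista (i - 1) = some (lista.getD (i.toNat - 1) 0) := by
  have hi0 : (0:Int) ≤ i := by omega
  have hi1 : (0:Int) ≤ i - 1 := by omega
  have hlt : i.toNat < lista.length := by omega
  have hlt1 : (i - 1).toNat < lista.length := by omega
  rw [PySem.List.pyGet?_of_nonneg _ hi0, PySem.List.pyGet?_of_nonneg _ hi1]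
  constructor
  · rw [List.getElem?_eq_getElem hlt, List.getD_eq_getElem _ _ hlt]
  · have hidx : (i - 1).toNat = i.toNat - 1 := by omega
    rw [hidx, List.getElem?_eq_getElem (by omega : i.toNat - 1 < lista.length),
      List.getD_eq_getElem _ _ (by omega : i.toNat - 1 < lista.length)]

theorem anyAscL_valid (lista : List Int) (r : List Int)
    (hr : ∀ i ∈ r, 1 ≤ i ∧ i < lista.length) :
    anyAscL lista r = r.any (fun i => ascB lista i.toNat) := by
  induction r with
  | nil => rfl
  | cons i rest ih =>
    obtain ⟨h1, h2⟩ := hr i (List.mem_cons_self ..)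
    obtain ⟨ha, hb⟩ := pyGet?_valid lista i h1 h2
    rw [anyAscL, ha, hb, List.any_cons, ih (fun j hj => hr j (List.mem_cons_of_mem _ hj))]
    by_cases h : lista.getD i.toNat 0 > lista.getD (i.toNat - 1) 0 <;> simp [ascB, h, Bool.or_comm]

theorem anyDescL_valid (lista : List Int) (r : List Int)
    (hr : ∀ i ∈ r, 1 ≤ i ∧ i < lista.length) :
    anyDescL lista r = r.any (fun i => descB lista i.toNat) := by
  induction r with
  | nil => rfl
  | cons i rest ih =>
    obtain ⟨h1, h2⟩ := hr i (List.mem_cons_self ..)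
    obtain ⟨ha, hb⟩ := pyGet?_valid lista i h1 h2
    rw [anyDescL, ha, hb, List.any_cons, ih (fun j hj => hr j (List.mem_cons_of_mem _ hj))]
    by_cases h : lista.getD i.toNat 0 < lista.getD (i.toNat - 1) 0 <;> simp [descB, h]

theorem ordLoopAL_valid (lista : List Int) (r : List Int)
    (hr : ∀ i ∈ r, 1 ≤ i ∧ i < lista.length) :
    ∀ C D, ordLoopAL lista r C D =
      (C || r.any (fun i => ascB lista i.toNat), D || r.any (fun i => descB lista i.toNat)) := by
  induction r with
  | nil => intro C D; simp [ordLoopAL]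
  | cons i rest ih =>
    intro C D
    obtain ⟨h1, h2⟩ := hr i (List.mem_cons_self ..)
    obtain ⟨ha, hb⟩ := pyGet?_valid lista i h1 h2
    have ihr := ih (fun j hj => hr j (List.mem_cons_of_mem _ hj))
    rw [ordLoopAL, ha, hb]
    simp only
    have hC' : (if lista.getD i.toNat 0 > lista.getD (i.toNat - 1) 0 then true else C)
        = (C || ascB lista i.toNat) := by
      by_cases h : lista.getD i.toNat 0 > lista.getD (i.toNat - 1) 0 <;> simp [ascB, h, Bool.or_comm]
    have hD' : (if lista.getD i.toNat 0 > lista.getD (i.toNat - 1) 0 then D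
          else if lista.getD i.toNat 0 < lista.getD (i.toNat - 1) 0 then true else D)
        = (D || descB lista i.toNat) := by
      by_cases hgt : lista.getD i.toNat 0 > lista.getD (i.toNat - 1) 0
      · rw [if_pos hgt]
        have hf : descB lista i.toNat = false := by
          rw [show descB lista i.toNat
              = decide (lista.getD i.toNat 0 < lista.getD (i.toNat - 1) 0) from rfl,
            decide_eq_false_iff_not]
          omega
        rw [hf, Bool.or_false]
      · rw [if_neg hgt]
        by_cases hlt : lista.getD i.toNat 0 < lista.getD (i.toNat - 1) 0
        · rw [if_pos hlt, show descB lista i.toNat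
              = decide (lista.getD i.toNat 0 < lista.getD (i.toNat - 1) 0) from rfl,
            decide_eq_true hlt, Bool.or_true]
        · rw [if_neg hlt, show descB lista i.toNat
              = decide (lista.getD i.toNat 0 < lista.getD (i.toNat - 1) 0) from rfl,
            decide_eq_false_iff_not.mpr hlt, Bool.or_false]
    rw [hC', hD']
    split_ifs with hbr
    · obtain ⟨hD, hC⟩ := Bool.and_eq_true_iff.mp hbr
      have e1 : (C || (ascB lista i.toNat || rest.any fun j => ascB lista j.toNat)) = true := by
        rcases Bool.or_eq_true_iff.mp hC with h | h <;> simp [h]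
      have e2 : (D || (descB lista i.toNat || rest.any fun j => descB lista j.toNat)) = true := by
        rcases Bool.or_eq_true_iff.mp hD with h | h <;> simp [h]
      simp only [List.any_cons]
      rw [hC, hD, e1, e2]
    · rw [ihr]
      simp only [List.any_cons]
      rw [Bool.or_assoc, Bool.or_assoc]

theorem ordLoopAL_tt (lista : List Int) (r : List Int) :
    ordLoopAL lista r true true = (true, true) := by
  cases r with
  | nil => rfl
  | cons i rest =>
    rw [ordLoopAL]
    cases hx : PySem.List.pyGet? lista i <;> cases hy : PySem.List.pyGet? lista (i - 1) <;> simp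

theorem ordLoopAL_append_tt (lista : List Int) (r1 r2 : List Int) (C D : Bool)
    (h : ordLoopAL lista r1 C D = (true, true)) :
    ordLoopAL lista (r1 ++ r2) C D = (true, true) := by
  induction r1 generalizing C D with
  | nil =>
    rw [List.nil_append]
    have h' : (C, D) = (true, true) := h
    injection h' with h1 h2
    subst h1; subst h2
    exact ordLoopAL_tt lista r2
  | cons i rest ih =>
    rw [List.cons_append]
    rw [show ∀ r, ordLoopAL lista (i :: r) C D =
        (match PySem.List.pyGet? lista i, PySem.List.pyGet? lista (i - 1) with
         | some a, some b =>
           let C' := if a > b then true else C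
           let D' := if a > b then D else if a < b then true else D
           if D' && C' then (C', D') else ordLoopAL lista r C' D'
         | _, _ => (C, D)) from fun r => rfl] at h ⊢
    cases hx : PySem.List.pyGet? lista i with
    | none =>
      rw [hx] at h
      cases hy : PySem.List.pyGet? lista (i - 1) with
      | none => rw [hy] at h; exact h
      | some b => rw [hy] at h; exact h
    | some a =>
      cases hy : PySem.List.pyGet? lista (i - 1) with
      | none => rw [hx, hy] at h; exact h
      | some b =>
        rw [hx, hy] at h
        simp only at h ⊢
        split_ifs at h ⊢ <;> first | exact h | exact ih _ _ h

theorem anyAscL_append_tt (lista : List Int) (r1 r2 : List Int)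
    (h : anyAscL lista r1 = true) : anyAscL lista (r1 ++ r2) = true := by
  induction r1 with
  | nil => simp [anyAscL] at h
  | cons i rest ih =>
    rw [List.cons_append]
    rw [show ∀ r, anyAscL lista (i :: r) =
        (match PySem.List.pyGet? lista i, PySem.List.pyGet? lista (i - 1) with
         | some a, some b => if a > b then true else anyAscL lista r
         | _, _ => false) from fun r => rfl] at h ⊢
    cases hx : PySem.List.pyGet? lista i with
    | none => rw [hx] at h; simp at h
    | some a =>
      cases hy : PySem.List.pyGet? lista (i - 1) with
      | none => rw [hx, hy] at h; simp at h
      | some b =>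
        rw [hx, hy] at h
        simp only at h ⊢
        split_ifs at h ⊢ with hgt
        · rfl
        · exact ih h

theorem anyDescL_append_tt (lista : List Int) (r1 r2 : List Int)
    (h : anyDescL lista r1 = true) : anyDescL lista (r1 ++ r2) = true := by
  induction r1 with
  | nil => simp [anyDescL] at h
  | cons i rest ih =>
    rw [List.cons_append]
    rw [show ∀ r, anyDescL lista (i :: r) =
        (match PySem.List.pyGet? lista i, PySem.List.pyGet? lista (i - 1) with
         | some a, some b => if a < b then true else anyDescL lista r
         | _, _ => false) from fun r => rfl] at h ⊢
    cases hx : PySem.List.pyGet? lista i with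
    | none => rw [hx] at h; simp at h
    | some a =>
      cases hy : PySem.List.pyGet? lista (i - 1) with
      | none => rw [hx, hy] at h; simp at h
      | some b =>
        rw [hx, hy] at h
        simp only at h ⊢
        split_ifs at h ⊢ with hlt
        · rfl
        · exact ih h

-- valid range: every i ∈ pyRange 1 m with m ≤ len is a valid pair index
theorem range_valid (lista : List Int) (m : Int) (hm : m ≤ lista.length) :
    ∀ i ∈ PySem.List.pyRange 1 m 1, 1 ≤ i ∧ i < lista.length := by
  intro i hi
  rw [PySem.List.mem_pyRange_one] at hi
  omega

-- ===== VERDICT (by name: the statement is the Claim_ definition above) =====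
theorem Ordenacion_spec : Claim_equal_Ordenacion := by
  intro size lista _ hpre
  unfold Spec_Ordenacion Ordenacion Ordenacion_alt
  have hr : PySem.List.pyRange 1 (1 + ((size - 1).toNat : Int)) 1 = PySem.List.pyRange 1 size 1 := by
    by_cases h1 : 1 ≤ size
    · congr 1
      omega
    · rw [PySem.List.pyRange_one_eq_nil (by omega), PySem.List.pyRange_one_eq_nil (by omega)]
  rw [ordLoopA_eq_list lista (size - 1).toNat 1 false false,
    anyAscI_eq_list lista (size - 1).toNat 1,
    anyDescI_eq_list lista (size - 1).toNat 1, hr]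
  by_cases hle : size ≤ lista.length
  · rw [ordLoopAL_valid lista _ (range_valid lista size hle),
        anyAscL_valid lista _ (range_valid lista size hle),
        anyDescL_valid lista _ (range_valid lista size hle)]
    cases (PySem.List.pyRange 1 size 1).any (fun i => ascB lista i.toNat) <;>
      cases (PySem.List.pyRange 1 size 1).any (fun i => descB lista i.toNat) <;> simp
  · -- size > len: Pre_ gives both an ascent and a descent inside the list; both programs
    -- reach them within pyRange 1 len and return "NO ESTA ORDENADA".
    rcases hpre with h | ⟨⟨ja, hja, hja0, hjaA⟩, ⟨jd, hjd, hjd0, hjdD⟩⟩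
    · exact absurd h hle
    have hlen1 : (1:Int) ≤ (lista.length : Int) := by
      have : 1 ≤ lista.length := by omega
      exact_mod_cast this
    have hsplit := PySem.List.pyRange_one_append 1 (lista.length : Int) size hlen1 (by omega)
    have hval := range_valid lista (lista.length : Int) le_rfl
    -- membership of the witnesses in pyRange 1 len
    have hmemA : ((ja : Int)) ∈ PySem.List.pyRange 1 (lista.length : Int) 1 := by
      rw [PySem.List.mem_pyRange_one]
      constructor <;> [exact_mod_cast hja0; exact_mod_cast hja]
    have hmemD : ((jd : Int)) ∈ PySem.List.pyRange 1 (lista.length : Int) 1 := by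
      rw [PySem.List.mem_pyRange_one]
      constructor <;> [exact_mod_cast hjd0; exact_mod_cast hjd]
    have hanyA : (PySem.List.pyRange 1 (lista.length : Int) 1).any (fun i => ascB lista i.toNat) = true := by
      rw [List.any_eq_true]
      exact ⟨(ja : Int), hmemA, by simpa [ascB, Int.toNat_natCast] using hjaA⟩
    have hanyD : (PySem.List.pyRange 1 (lista.length : Int) 1).any (fun i => descB lista i.toNat) = true := by
      rw [List.any_eq_true]
      exact ⟨(jd : Int), hmemD, by simpa [descB, Int.toNat_natCast] using hjdD⟩
    have hA : ordLoopAL lista (PySem.List.pyRange 1 size 1) false false = (true, true) := by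
      rw [hsplit]
      apply ordLoopAL_append_tt
      rw [ordLoopAL_valid lista _ hval, hanyA, hanyD]
      simp
    have hBa : anyAscL lista (PySem.List.pyRange 1 size 1) = true := by
      rw [hsplit]
      apply anyAscL_append_tt
      rw [anyAscL_valid lista _ hval]
      exact hanyA
    have hBd : anyDescL lista (PySem.List.pyRange 1 size 1) = true := by
      rw [hsplit]
      apply anyDescL_append_tt
      rw [anyDescL_valid lista _ hval]
      exact hanyD
    rw [hA, hBa, hBd]
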